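-- pv_equiv track=rewrite | github.com/jonchisko/ieps_seminarska2 | implementation/test_runner.py | find_body
-- ===== SOURCE A (Python) =====
-- def find_body(items):
--     body_start = 0
--     body_end = 0
--
--     for i in range(len(items)):
--         if "<body" in items[i]:
--             body_start = i
--         if "</body" in items[i]:
--             body_end = i
--
--     return body_start, body_end
-- ===== SOURCE B (Python) =====
-- def find_body(items):
--     body_start = 0
--     body_end = 0
--     found_start = False
--     found_end = False
--     for i in range(len(items) - 1, -1, -1):
--         s = items[i]
--         if not found_start and "<body" in s:
--             body_start = i
--             found_start = True
--         if not found_end and "</body" in s: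
--             body_end = i
--             found_end = True
--         if found_start and found_end:
--             break
--     return body_start, body_end
-- ===== Notes on version B (the rewrite author's own statement) =====
-- stated objective: alternative
-- what changed: Scans backwards from the end with two found-flags and stops as soon as both tags have been seen, instead of scanning the whole list forwards and overwriting the indices.
import Mathlib
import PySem

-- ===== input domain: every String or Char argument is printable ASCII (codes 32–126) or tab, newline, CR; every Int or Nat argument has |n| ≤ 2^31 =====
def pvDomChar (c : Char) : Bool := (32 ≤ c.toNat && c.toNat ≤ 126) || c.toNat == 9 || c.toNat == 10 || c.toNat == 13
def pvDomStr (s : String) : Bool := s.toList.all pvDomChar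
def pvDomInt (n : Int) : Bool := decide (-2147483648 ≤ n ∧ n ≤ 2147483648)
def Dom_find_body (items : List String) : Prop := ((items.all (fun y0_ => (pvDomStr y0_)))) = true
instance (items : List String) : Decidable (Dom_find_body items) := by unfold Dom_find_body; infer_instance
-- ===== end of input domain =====

-- B replaces A's full forward scan by a backward scan with found-flags that stops
-- as soon as both tags have been seen (alternative decomposition, same asymptotic cost).

-- ===== PORT A =====
def find_body (items : List String) : Int × Int :=
  (PySem.List.pyRange 0 items.length 1).foldl
    (fun st i =>
      let s := PySem.List.pyGetD items i ""
      let st1 := if PySem.Str.isIn "<body" s then (i, st.2) else st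
      if PySem.Str.isIn "</body" s then (st1.1, i) else st1)
    (0, 0)

-- ===== PORT B =====
-- countdown loop: k = i + 1, i.e. `find_body_altGo items (i+1) …` processes index i next
def find_body_altGo (items : List String) : Nat → Int → Int → Bool → Bool → Int × Int
  | 0, bs, be, _, _ => (bs, be)
  | k + 1, bs, be, fs, fe =>
      let s := items.getD k ""
      let p : Int × Bool := if !fs && PySem.Str.isIn "<body" s then ((k : Int), true) else (bs, fs)
      let q : Int × Bool := if !fe && PySem.Str.isIn "</body" s then ((k : Int), true) else (be, fe)
      if p.2 && q.2 then (p.1, q.1)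
      else find_body_altGo items k p.1 q.1 p.2 q.2

def find_body_alt (items : List String) : Int × Int :=
  find_body_altGo items items.length 0 0 false false

-- ===== PRECONDITION & SPEC =====
def Spec_find_body (items : List String) (out : Int × Int) : Prop := out = find_body_alt items
instance (items : List String) (out : Int × Int) : Decidable (Spec_find_body items out) := by unfold Spec_find_body; infer_instance

-- ===== CLAIM (what is proved, stated in full; the proofs are below) =====
def Claim_equal_find_body : Prop := ∀ (items : List String), Dom_find_body items → Spec_find_body items (find_body items)

-- ===== LEMMAS AND PROOFS =====

-- last index i < k with pat a substring of items[i], 0 if none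
def lastIdx (items : List String) (pat : String) (k : Nat) : Int :=
  (List.range k).foldl
    (fun a i => if PySem.Str.isIn pat (items.getD i "") then (i : Int) else a) 0

theorem lastIdx_succ (items : List String) (pat : String) (k : Nat) :
    lastIdx items pat (k + 1) =
      if PySem.Str.isIn pat (items.getD k "") then (k : Int) else lastIdx items pat k := by
  unfold lastIdx
  rw [List.range_succ, List.foldl_append]
  simp

theorem find_body_eq_lastIdx (items : List String) :
    find_body items =
      (lastIdx items "<body" items.length, lastIdx items "</body" items.length) := by
  unfold find_body
  rw [PySem.List.pyRange_one]
  simp only [sub_zero, Int.toNat_natCast, List.foldl_map]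
  induction items.length with
  | zero => rfl
  | succ n ih =>
      rw [List.range_succ, List.foldl_append, ih, lastIdx_succ, lastIdx_succ]
      simp only [List.foldl_cons, List.foldl_nil, zero_add, PySem.List.pyGetD_natCast]
      simp only [PySem.Str.isIn_eq]
      split_ifs <;> simp_all

theorem find_body_altGo_eq (items : List String) :
    ∀ (k : Nat) (bs be : Int) (fs fe : Bool),
      (fs = false → bs = 0) → (fe = false → be = 0) →
      find_body_altGo items k bs be fs fe =
        ((if fs then bs else lastIdx items "<body" k),
         (if fe then be else lastIdx items "</body" k)) := by
  intro k
  induction k with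
  | zero =>
      intro bs be fs fe hbs hbe
      cases fs <;> cases fe <;> simp [find_body_altGo, lastIdx, hbs, hbe]
  | succ n ih =>
      intro bs be fs fe hbs hbe
      rw [lastIdx_succ, lastIdx_succ]
      have ihtt : ∀ bs be, find_body_altGo items n bs be true true =
          (bs, be) := fun bs be => by
        rw [ih bs be true true (by simp) (by simp)]; simp
      have ihtf : ∀ bs, find_body_altGo items n bs 0 true false =
          (bs, lastIdx items "</body" n) := fun bs => by
        rw [ih bs 0 true false (by simp) (fun _ => rfl)]; simp
      have ihft : ∀ be, find_body_altGo items n 0 be false true =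
          (lastIdx items "<body" n, be) := fun be => by
        rw [ih 0 be false true (fun _ => rfl) (by simp)]; simp
      have ihff : find_body_altGo items n 0 0 false false =
          (lastIdx items "<body" n, lastIdx items "</body" n) := by
        rw [ih 0 0 false false (fun _ => rfl) (fun _ => rfl)]; simp
      simp only [find_body_altGo]
      cases fs with
      | true =>
          cases fe with
          | true =>
              by_cases h1 : PySem.Str.isIn "<body" (items.getD n "") = true <;>
                by_cases h2 : PySem.Str.isIn "</body" (items.getD n "") = true <;>
                  simp_all
          | false =>
              have : be = 0 := hbe rfl; subst this
              by_cases h1 : PySem.Str.isIn "<body" (items.getD n "") = true <;>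
                by_cases h2 : PySem.Str.isIn "</body" (items.getD n "") = true <;>
                  simp_all [ihtf]
      | false =>
          have : bs = 0 := hbs rfl; subst this
          cases fe with
          | true =>
              by_cases h1 : PySem.Str.isIn "<body" (items.getD n "") = true <;>
                by_cases h2 : PySem.Str.isIn "</body" (items.getD n "") = true <;>
                  simp_all [ihft]
          | false =>
              by_cases h1 : PySem.Str.isIn "<body" (items.getD n "") = true <;>
                by_cases h2 : PySem.Str.isIn "</body" (items.getD n "") = true <;>
                  simp_all [ihff]

-- ===== VERDICT (by name: the statement is the Claim_ definition above) =====
theorem find_body_spec : Claim_equal_find_body := by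
  intro items _
  unfold Spec_find_body find_body_alt
  rw [find_body_eq_lastIdx, find_body_altGo_eq items items.length 0 0 false false
    (fun _ => rfl) (fun _ => rfl)]
  simp
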